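-- pv_equiv track=rewrite | github.com/martin-ng/Algostructures.py | Strings/Repeated_Strings_Max.py | max_repeated_chars
-- ===== SOURCE A (Python) =====
-- def max_repeated_chars(string, max):
--     if len(string) == 0 or max == 0:
--         return
--
--     new_str = ''
--     last_seen = None
--     last_seen_count = None
--
--     for char in string:
--         if char != last_seen:
--             last_seen = char
--             last_seen_count = 1
--         else:
--             last_seen_count += 1
--         if last_seen_count <= max:
--             new_str += char
--
--     return new_str
-- ===== SOURCE B (Python) =====
-- from itertools import groupby
--
-- def max_repeated_chars(string, max):
--     if len(string) == 0 or max == 0: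
--         return
--     return ''.join(ch * min(sum(1 for _ in grp), max) for ch, grp in groupby(string))
-- ===== Notes on version B (the rewrite author's own statement) =====
-- stated objective: idiomatic
-- what changed: Replaces the character-by-character last_seen/count state machine with itertools.groupby: the string is split into maximal runs first and each run emits min(run length, max) copies of its character.
import Mathlib
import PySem

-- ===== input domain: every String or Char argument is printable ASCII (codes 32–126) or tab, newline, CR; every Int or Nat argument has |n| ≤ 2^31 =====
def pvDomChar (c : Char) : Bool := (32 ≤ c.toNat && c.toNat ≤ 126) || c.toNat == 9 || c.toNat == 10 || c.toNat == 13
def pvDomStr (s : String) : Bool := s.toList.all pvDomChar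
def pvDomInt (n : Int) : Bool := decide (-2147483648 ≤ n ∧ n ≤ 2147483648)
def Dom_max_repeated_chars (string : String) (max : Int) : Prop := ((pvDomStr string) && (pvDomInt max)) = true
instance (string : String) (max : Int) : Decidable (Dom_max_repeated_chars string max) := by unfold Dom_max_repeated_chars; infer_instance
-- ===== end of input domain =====

-- B replaces A's character-by-character last_seen/count state machine with a groupby-style
-- split into maximal runs, emitting min(run length, max) copies per run (idiomatic, same cost).

-- ===== PORT A =====
-- A's for-loop: state = (last_seen : Option Char, last_seen_count : Int, new_str as List Char).
-- last_seen_count starts at 0 standing for Python's None: it is never compared before being set,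
-- since on the first character `char != last_seen` (last_seen = None) always holds.
def aLoop (max : Int) (last : Option Char) (cnt : Int) (acc : List Char) : List Char → List Char
  | [] => acc
  | ch :: rest =>
    let st := if some ch ≠ last then (some ch, (1 : Int)) else (last, cnt + 1)
    aLoop max st.1 st.2 (if st.2 ≤ max then acc ++ [ch] else acc) rest

def max_repeated_chars (string : String) (max : Int) : Option String :=
  if PySem.Str.len string == 0 || max == 0 then none
  else some (String.mk (aLoop max none 0 [] string.toList))

-- ===== PORT B =====
-- itertools.groupby: maximal runs of equal chars, forward, with their lengths.
def runsGo (c : Char) (n : Nat) : List Char → List (Char × Nat)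
  | [] => [(c, n)]
  | x :: xs => if x = c then runsGo c (n + 1) xs else (c, n) :: runsGo x 1 xs

def runs : List Char → List (Char × Nat)
  | [] => []
  | x :: xs => runsGo x 1 xs

-- ch * min(cnt, max) for one group (Python's negative repeat count gives '')
def emitRun (max : Int) (p : Char × Nat) : List Char :=
  List.replicate (min (p.2 : Int) max).toNat p.1

def max_repeated_chars_alt (string : String) (max : Int) : Option String :=
  if PySem.Str.len string == 0 || max == 0 then none
  else some (String.mk (((runs string.toList).map (emitRun max)).flatten))

-- ===== PRECONDITION & SPEC =====
def Spec_max_repeated_chars (string : String) (max : Int) (out : Option String) : Prop := out = max_repeated_chars_alt string max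
instance (string : String) (max : Int) (out : Option String) : Decidable (Spec_max_repeated_chars string max out) := by unfold Spec_max_repeated_chars; infer_instance

-- ===== CLAIM (what is proved, stated in full; the proofs are below) =====
def Claim_equal_max_repeated_chars : Prop := ∀ (string : String) (max : Int), Dom_max_repeated_chars string max → Spec_max_repeated_chars string max (max_repeated_chars string max)

-- ===== LEMMAS AND PROOFS =====

theorem aLoop_acc (max : Int) (last : Option Char) (cnt : Int) (acc : List Char) (l : List Char) :
    aLoop max last cnt acc l = acc ++ aLoop max last cnt [] l := by
  induction l generalizing last cnt acc with
  | nil => simp [aLoop]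
  | cons ch rest ih =>
    simp only [aLoop]
    rw [ih]
    conv_rhs => rw [ih]
    split <;> split <;> simp

-- one emitted min(1,max) block = A's first-character-of-a-run test
theorem emit_one (max : Int) (x : Char) :
    List.replicate (min (1 : Int) max).toNat x = (if (1 : Int) ≤ max then [x] else []) := by
  by_cases h : (1 : Int) ≤ max
  · have h1 : (min (1 : Int) max).toNat = 1 := by omega
    rw [h1, if_pos h]
    rfl
  · have h1 : (min (1 : Int) max).toNat = 0 := by omega
    rw [h1, if_neg h]
    rfl

-- run-level invariant: B's remaining emission from a partially consumed run (n chars of c seen)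
-- equals what A already emitted for that run plus A's remaining loop output
theorem key (max : Int) : ∀ (l : List Char) (c : Char) (n : Nat),
    ((runsGo c n l).map (emitRun max)).flatten
      = List.replicate (min ((n : Nat) : Int) max).toNat c ++ aLoop max (some c) (n : Int) [] l := by
  intro l
  induction l with
  | nil => intro c n; simp [runsGo, aLoop, emitRun]
  | cons x xs ih =>
    intro c n
    by_cases hx : x = c
    · subst hx
      simp only [runsGo, aLoop, ne_eq, not_true_eq_false, ite_true, ite_false]
      rw [ih x (n + 1), aLoop_acc]
      have hcast : ((n : Int) + 1) = (((n + 1 : Nat)) : Int) := by push_cast; ring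
      rw [hcast]
      by_cases h : (((n + 1 : Nat)) : Int) ≤ max
      · have h1 : (min (((n + 1 : Nat)) : Int) max).toNat = n + 1 := by omega
        have h2 : (min ((n : Nat) : Int) max).toNat = n := by omega
        rw [if_pos h, h1, h2, List.replicate_succ']
        conv_rhs => rw [aLoop_acc]
        simp
      · have h1 : (min (((n + 1 : Nat)) : Int) max).toNat = (min ((n : Nat) : Int) max).toNat := by omega
        rw [if_neg h, h1]
        simp
    · simp only [runsGo, if_neg hx, aLoop]
      rw [List.map_cons, List.flatten_cons, ih x 1]
      simp only [ne_eq, if_pos (by simp [hx] : some x ≠ some c), Nat.cast_one]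
      rw [emit_one]
      conv_rhs => rw [aLoop_acc]
      simp [emitRun]

-- ===== VERDICT (by name: the statement is the Claim_ definition above) =====
theorem max_repeated_chars_spec : Claim_equal_max_repeated_chars := by
  intro string max _
  unfold Spec_max_repeated_chars max_repeated_chars max_repeated_chars_alt
  split
  · rfl
  · rename_i hguard
    cases hs : string.toList with
    | nil =>
      exfalso
      apply hguard
      simp [PySem.Str.len, hs]
    | cons x xs =>
      simp only [runs]
      rw [key max xs x 1]
      simp only [aLoop, ne_eq, if_pos (by simp : some x ≠ none), Nat.cast_one]
      rw [emit_one]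
      conv_lhs => rw [aLoop_acc]
      simp
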